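-- pv_equiv track=rewrite | github.com/allan-tulane/sp22-assignment-05-mikafur32 | main.py | fast_MED_arr
-- ===== SOURCE A (Python) =====
-- def fast_MED_arr(S, T):
--     def pad(x, y):
--         # pad with leading 0 if x/y have different number of bits
--         # e.g., [1,0] vs [1]
--         pad_length = 0
--         pad_bool = True
--         if len(x) < len(y):
--             pad_length = (len(y) - len(x))
--             pad_bool = True
--             x = x + '0' * pad_length
--         elif len(y) < len(x):
--             pad_length = (len(x) - len(y))
--             pad_bool = False
--             y = y + '0' * pad_length
--         return x, y, pad_length, pad_bool
--
--     S, T, pad_length, pad_bool = pad(S, T)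
--
--     memo_arr = [[0 for n in range(len(S))] for m in range(len(T))]
--
--     for i in range(len(S)):
--         for j in range(len(T)):
--             if i == 0:
--                 memo_arr[i][j] = j
--
--             elif j == 0:
--                 memo_arr[i][j] = i
--             else:
--                 if S[i] == T[j]:
--                     memo_arr[i][j] = memo_arr[i - 1][j - 1]
--                 else:
--                     memo_arr[i][j] = 1 + min(memo_arr[i - 1][j - 1], memo_arr[i][j - 1], memo_arr[i - 1][j])
--     # format_arr(memo_arr,S,T)
--     return memo_arr
-- ===== SOURCE B (Python) =====
-- def fast_MED_arr(S, T):
--     n = max(len(S), len(T))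
--     S = S + '0' * (n - len(S))
--     T = T + '0' * (n - len(T))
--     memo = {}
--
--     def med(i, j):
--         got = memo.get((i, j))
--         if got is not None:
--             return got
--         if i == 0:
--             v = j
--         elif j == 0:
--             v = i
--         elif S[i] == T[j]:
--             v = med(i - 1, j - 1)
--         else:
--             v = 1 + min(med(i - 1, j - 1), med(i, j - 1), med(i - 1, j))
--         memo[(i, j)] = v
--         return v
--
--     return [[med(i, j) for j in range(n)] for i in range(n)]
-- ===== Notes on version B (the rewrite author's own statement) =====
-- stated objective: alternative
-- what changed: A fills a pre-allocated n x n zero table bottom-up with nested index loops and in-place writes; B computes each cell by a top-down memoized recursion med(i,j) over a dictionary keyed by (i,j) and assembles the result as a nested comprehension of med calls, with no pre-allocated table.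
import Mathlib
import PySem

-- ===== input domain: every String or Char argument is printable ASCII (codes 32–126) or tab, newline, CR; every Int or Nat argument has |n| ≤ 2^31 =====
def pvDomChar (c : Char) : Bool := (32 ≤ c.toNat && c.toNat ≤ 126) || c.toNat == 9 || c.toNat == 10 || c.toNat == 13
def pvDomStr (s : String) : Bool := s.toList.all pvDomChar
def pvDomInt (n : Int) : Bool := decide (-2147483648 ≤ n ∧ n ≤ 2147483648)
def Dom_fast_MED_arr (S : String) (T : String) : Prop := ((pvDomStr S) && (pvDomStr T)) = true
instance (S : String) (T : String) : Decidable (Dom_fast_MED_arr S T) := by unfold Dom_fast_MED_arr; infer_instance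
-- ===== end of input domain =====

-- B replaces A's bottom-up in-place fill of a pre-allocated square table by a top-down
-- memoized recursion over a dictionary keyed by (i, j); objective: alternative
-- decomposition, same O(n^2) cost.

-- ===== PORT A =====
-- pad(x, y): append '0's to the shorter string (also returns pad_length and pad_bool, unused)
def padA (x y : List Char) : List Char × List Char × Int × Bool :=
  if x.length < y.length then
    (x ++ List.replicate (y.length - x.length) '0', y, ((y.length - x.length : Nat) : Int), true)
  else if y.length < x.length then
    (x, y ++ List.replicate (x.length - y.length) '0', ((x.length - y.length : Nat) : Int), false)
  else (x, y, 0, true)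

-- memo_arr[i][j] read / write (indices are always in range in A's loops)
def getCellA (memo : List (List Int)) (i j : Nat) : Int := (memo.getD i []).getD j 0
def setCellA (memo : List (List Int)) (i j : Nat) (v : Int) : List (List Int) :=
  memo.set i ((memo.getD i []).set j v)

-- the body of A's inner 'for j in range(len(T))' loop
def innerA (s t : List Char) (i : Nat) (memo : List (List Int)) : List (List Int) :=
  (List.range t.length).foldl (fun memo j =>
    if i = 0 then setCellA memo i j (j : Int)
    else if j = 0 then setCellA memo i j (i : Int)
    else if s.getD i ' ' == t.getD j ' ' then
      setCellA memo i j (getCellA memo (i-1) (j-1))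
    else
      setCellA memo i j
        (1 + min (min (getCellA memo (i-1) (j-1)) (getCellA memo i (j-1)))
                 (getCellA memo (i-1) j))) memo

def fast_MED_arr (S : String) (T : String) : List (List Int) :=
  let p := padA S.toList T.toList
  let s := p.1
  let t := p.2.1
  let memo0 := List.replicate t.length (List.replicate s.length (0 : Int))
  (List.range s.length).foldl (fun memo i => innerA s t i memo) memo0

-- ===== PORT B =====
-- med(i, j): top-down memoized recursion; returns the value and the updated memo dict
def medB (s t : List Char) (i j : Nat) (memo : PySem.Dict (Nat × Nat) Int) :
    Int × PySem.Dict (Nat × Nat) Int :=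
  match memo.get? (i, j) with
  | some v => (v, memo)
  | none =>
    if hi : i = 0 then
      ((j : Int), memo.insert (i, j) (j : Int))
    else if hj : j = 0 then
      ((i : Int), memo.insert (i, j) (i : Int))
    else if s.getD i ' ' == t.getD j ' ' then
      let p := medB s t (i-1) (j-1) memo
      (p.1, p.2.insert (i, j) p.1)
    else
      let a := medB s t (i-1) (j-1) memo
      let b := medB s t i (j-1) a.2
      let c := medB s t (i-1) j b.2
      let v := 1 + min (min a.1 b.1) c.1
      (v, c.2.insert (i, j) v)
termination_by (i, j)
decreasing_by all_goals omega

def fast_MED_arr_alt (S : String) (T : String) : List (List Int) :=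
  let n := max S.toList.length T.toList.length
  let s := S.toList ++ List.replicate (n - S.toList.length) '0'
  let t := T.toList ++ List.replicate (n - T.toList.length) '0'
  ((List.range n).foldl (fun (acc : List (List Int) × PySem.Dict (Nat × Nat) Int) i =>
      let r := (List.range n).foldl (fun (st : List Int × PySem.Dict (Nat × Nat) Int) j =>
          let p := medB s t i j st.2
          (st.1 ++ [p.1], p.2)) ([], acc.2)
      (acc.1 ++ [r.1], r.2)) ([], PySem.Dict.empty)).1

-- ===== PRECONDITION & SPEC =====
def Spec_fast_MED_arr (S : String) (T : String) (out : List (List Int)) : Prop := out = fast_MED_arr_alt S T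
instance (S : String) (T : String) (out : List (List Int)) : Decidable (Spec_fast_MED_arr S T out) := by unfold Spec_fast_MED_arr; infer_instance

-- ===== CLAIM =====
def Claim_equal_fast_MED_arr : Prop := ∀ (S : String) (T : String), Dom_fast_MED_arr S T → Spec_fast_MED_arr S T (fast_MED_arr S T)

-- ===== LEMMAS AND PROOFS =====

-- the mathematical cell value both programs compute
def cell (s t : List Char) : Nat → Nat → Int
  | 0, j => (j : Int)
  | (i+1), 0 => ((i+1 : Nat) : Int)
  | (i+1), (j+1) =>
    if s.getD (i+1) ' ' == t.getD (j+1) ' ' then cell s t i j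
    else 1 + min (min (cell s t i j) (cell s t (i+1) j)) (cell s t i (j+1))
termination_by i j => (i, j)

def tbl (s t : List Char) (n : Nat) : List (List Int) :=
  (List.range n).map (fun i => (List.range n).map (fun j => cell s t i j))

-- partially filled state of A's table: rows < i full, row i filled up to column k
def pstate (s t : List Char) (n i k : Nat) : List (List Int) :=
  (List.range n).map (fun a => (List.range n).map (fun b =>
    if a < i ∨ (a = i ∧ b < k) then cell s t a b else 0))

lemma set_map_range {β : Type} (f : Nat → β) (n a : Nat) (v : β) (_ha : a < n) :
    ((List.range n).map f).set a v = (List.range n).map (fun x => if x = a then v else f x) := by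
  apply List.ext_getElem (by simp)
  intro k h1 h2
  simp only [List.getElem_set, List.getElem_map, List.getElem_range] at *
  by_cases h : a = k <;> simp [h, eq_comm]

lemma cell_zero (s t : List Char) (j : Nat) : cell s t 0 j = (j : Int) := by
  cases j <;> simp [cell]

lemma cell_col_zero (s t : List Char) (i : Nat) : cell s t i 0 = (i : Int) := by
  cases i <;> simp [cell]

lemma cell_pos (s t : List Char) (i j : Nat) (hi : 0 < i) (hj : 0 < j) :
    cell s t i j = if s.getD i ' ' == t.getD j ' ' then cell s t (i-1) (j-1)
      else 1 + min (min (cell s t (i-1) (j-1)) (cell s t i (j-1))) (cell s t (i-1) j) := by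
  obtain ⟨i', rfl⟩ : ∃ i', i = i' + 1 := ⟨i - 1, by omega⟩
  obtain ⟨j', rfl⟩ : ∃ j', j = j' + 1 := ⟨j - 1, by omega⟩
  simp [cell]

lemma getCellA_pstate (s t : List Char) (n i k a b : Nat) (ha : a < n) (hb : b < n) :
    getCellA (pstate s t n i k) a b =
      if a < i ∨ (a = i ∧ b < k) then cell s t a b else 0 := by
  unfold getCellA pstate
  rw [PySem.List.getD_map_range _ n a _ ha, PySem.List.getD_map_range _ n b _ hb]

lemma setCellA_pstate (s t : List Char) (n i k : Nat) (hi : i < n) (hk : k < n) :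
    setCellA (pstate s t n i k) i k (cell s t i k) = pstate s t n i (k+1) := by
  unfold setCellA pstate
  rw [PySem.List.getD_map_range _ n i _ hi, set_map_range _ n k _ hk, set_map_range _ n i _ hi]
  apply List.map_congr_left
  intro a ha
  simp only [List.mem_range] at ha
  by_cases h : a = i
  · subst h
    rw [if_pos rfl]
    apply List.map_congr_left
    intro b hb
    simp only [List.mem_range] at hb
    by_cases h2 : b = k
    · subst h2
      rw [if_pos rfl, if_pos (by omega : (a < a ∨ (a = a ∧ b < b + 1)))]
    · rw [if_neg h2]
      have h3 : (a < a ∨ (a = a ∧ b < k)) ↔ (a < a ∨ (a = a ∧ b < k + 1)) := by omega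
      rw [if_congr h3 rfl rfl]
  · rw [if_neg h]
    apply List.map_congr_left
    intro b hb
    have h3 : (a < i ∨ (a = i ∧ b < k)) ↔ (a < i ∨ (a = i ∧ b < k + 1)) := by omega
    rw [if_congr h3 rfl rfl]

-- one step of A's inner loop writes exactly cell i j
lemma innerA_step (s t : List Char) (n i j : Nat) (hi : i < n) (hj : j < n) :
    (if i = 0 then setCellA (pstate s t n i j) i j (j : Int)
     else if j = 0 then setCellA (pstate s t n i j) i j (i : Int)
     else if s.getD i ' ' == t.getD j ' ' then
       setCellA (pstate s t n i j) i j (getCellA (pstate s t n i j) (i-1) (j-1))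
     else
       setCellA (pstate s t n i j) i j
         (1 + min (min (getCellA (pstate s t n i j) (i-1) (j-1))
                       (getCellA (pstate s t n i j) i (j-1)))
                  (getCellA (pstate s t n i j) (i-1) j)))
    = pstate s t n i (j+1) := by
  by_cases h0 : i = 0
  · subst h0
    rw [if_pos rfl, show ((j : Int)) = cell s t 0 j from (cell_zero s t j).symm,
        setCellA_pstate s t n 0 j hi hj]
  · rw [if_neg h0]
    by_cases hj0 : j = 0
    · subst hj0
      rw [if_pos rfl, show ((i : Int)) = cell s t i 0 from (cell_col_zero s t i).symm,
          setCellA_pstate s t n i 0 hi hj]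
    · rw [if_neg hj0]
      have hgd : getCellA (pstate s t n i j) (i-1) (j-1) = cell s t (i-1) (j-1) := by
        rw [getCellA_pstate s t n i j _ _ (by omega) (by omega),
            if_pos (by omega : (i-1 < i ∨ (i-1 = i ∧ j-1 < j)))]
      have hgl : getCellA (pstate s t n i j) i (j-1) = cell s t i (j-1) := by
        rw [getCellA_pstate s t n i j _ _ (by omega) (by omega),
            if_pos (by omega : (i < i ∨ (i = i ∧ j-1 < j)))]
      have hgu : getCellA (pstate s t n i j) (i-1) j = cell s t (i-1) j := by
        rw [getCellA_pstate s t n i j _ _ (by omega) (by omega),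
            if_pos (by omega : (i-1 < i ∨ (i-1 = i ∧ j < j)))]
      rw [hgd, hgl, hgu]
      by_cases hc : (s.getD i ' ' == t.getD j ' ') = true
      · rw [if_pos hc,
            show cell s t (i-1) (j-1) = cell s t i j from by
              rw [cell_pos s t i j (by omega) (by omega), if_pos hc]]
        exact setCellA_pstate s t n i j hi hj
      · rw [if_neg hc,
            show (1 + min (min (cell s t (i-1) (j-1)) (cell s t i (j-1))) (cell s t (i-1) j))
                = cell s t i j from by
              rw [cell_pos s t i j (by omega) (by omega), if_neg hc]]
        exact setCellA_pstate s t n i j hi hj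

lemma innerA_loop (s t : List Char) (n i : Nat) (hi : i < n) :
    ∀ (m k : Nat), k + m = n →
      (List.range' k m).foldl (fun memo j =>
        if i = 0 then setCellA memo i j (j : Int)
        else if j = 0 then setCellA memo i j (i : Int)
        else if s.getD i ' ' == t.getD j ' ' then
          setCellA memo i j (getCellA memo (i-1) (j-1))
        else
          setCellA memo i j
            (1 + min (min (getCellA memo (i-1) (j-1)) (getCellA memo i (j-1)))
                     (getCellA memo (i-1) j))) (pstate s t n i k)
      = pstate s t n i n := by
  intro m
  induction m with
  | zero => intro k hk; simp [List.range']; rw [show k = n by omega]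
  | succ m ih =>
    intro k hk
    rw [List.range'_succ, List.foldl_cons, innerA_step s t n i k hi (by omega)]
    exact ih (k+1) (by omega)

lemma pstate_row_done (s t : List Char) (n i : Nat) :
    pstate s t n i n = pstate s t n (i+1) 0 := by
  unfold pstate
  apply List.map_congr_left
  intro a _
  apply List.map_congr_left
  intro b hb
  simp only [List.mem_range] at hb
  have : (a < i ∨ (a = i ∧ b < n)) ↔ (a < i + 1 ∨ (a = i + 1 ∧ b < 0)) := by omega
  rw [if_congr this rfl rfl]

lemma innerA_eq (s t : List Char) (n i : Nat) (ht : t.length = n) (hi : i < n) :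
    innerA s t i (pstate s t n i 0) = pstate s t n (i+1) 0 := by
  unfold innerA
  rw [ht, List.range_eq_range']
  rw [innerA_loop s t n i hi n 0 (by omega), pstate_row_done]

lemma outerA_loop (s t : List Char) (n : Nat) (ht : t.length = n) :
    ∀ (m k : Nat), k + m = n →
      (List.range' k m).foldl (fun memo i => innerA s t i memo) (pstate s t n k 0)
      = pstate s t n n 0 := by
  intro m
  induction m with
  | zero => intro k hk; simp [List.range']; rw [show k = n by omega]
  | succ m ih =>
    intro k hk
    rw [List.range'_succ, List.foldl_cons, innerA_eq s t n k ht (by omega)]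
    exact ih (k+1) (by omega)

lemma pstate_init (s t : List Char) (n : Nat) :
    List.replicate n (List.replicate n (0 : Int)) = pstate s t n 0 0 := by
  unfold pstate
  apply List.ext_getElem (by simp)
  intro a h1 h2
  simp only [List.getElem_replicate, List.getElem_map, List.getElem_range]
  apply List.ext_getElem (by simp)
  intro b h3 h4
  simp

lemma pstate_full (s t : List Char) (n : Nat) : pstate s t n n 0 = tbl s t n := by
  unfold pstate tbl
  apply List.map_congr_left
  intro a ha
  simp only [List.mem_range] at ha
  apply List.map_congr_left
  intro b _
  simp [ha]

lemma padA_len (x y : List Char) :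
    (padA x y).1.length = max x.length y.length ∧
    (padA x y).2.1.length = max x.length y.length := by
  unfold padA
  split_ifs <;> simp <;> omega

lemma padA_eq (x y : List Char) :
    (padA x y).1 = x ++ List.replicate (max x.length y.length - x.length) '0' ∧
    (padA x y).2.1 = y ++ List.replicate (max x.length y.length - y.length) '0' := by
  unfold padA
  split_ifs with h1 h2
  · constructor
    · simp [Nat.max_eq_right (le_of_lt h1)]
    · simp [Nat.max_eq_right (le_of_lt h1)]
  · constructor
    · simp [Nat.max_eq_left (le_of_lt h2)]
    · simp [Nat.max_eq_left (le_of_lt h2)]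
  · have : x.length = y.length := by omega
    simp [this]

lemma coreA_eq_tbl (s t : List Char) (n : Nat) (hs : s.length = n) (ht : t.length = n) :
    (List.range s.length).foldl (fun memo i => innerA s t i memo)
      (List.replicate t.length (List.replicate s.length (0 : Int))) = tbl s t n := by
  rw [hs, ht, pstate_init s t n, List.range_eq_range',
      outerA_loop s t n ht n 0 (by omega), pstate_full]

lemma fast_MED_arr_eq_tbl (S T : String) :
    fast_MED_arr S T =
      tbl (S.toList ++ List.replicate (max S.toList.length T.toList.length - S.toList.length) '0')
          (T.toList ++ List.replicate (max S.toList.length T.toList.length - T.toList.length) '0')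
          (max S.toList.length T.toList.length) := by
  obtain ⟨h1, h2⟩ := padA_eq S.toList T.toList
  obtain ⟨hl1, hl2⟩ := padA_len S.toList T.toList
  have hA : fast_MED_arr S T =
      tbl (padA S.toList T.toList).1 (padA S.toList T.toList).2.1
          (max S.toList.length T.toList.length) :=
    coreA_eq_tbl _ _ _ hl1 hl2
  rw [hA, h1, h2]

-- ---- B side ----

-- the memo invariant: every stored value is the table value of its key
def InvM (s t : List Char) (m : PySem.Dict (Nat × Nat) Int) : Prop :=
  ∀ i j v, m.get? (i, j) = some v → v = cell s t i j

lemma InvM_empty (s t : List Char) : InvM s t PySem.Dict.empty := by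
  intro i j v hv
  simp [PySem.Dict.get?_empty] at hv

lemma InvM_insert (s t : List Char) (m : PySem.Dict (Nat × Nat) Int) (i j : Nat) (v : Int)
    (hm : InvM s t m) (hv : v = cell s t i j) : InvM s t (m.insert (i, j) v) := by
  intro a b w hw
  rw [PySem.Dict.get?_insert] at hw
  split at hw
  · rename_i h
    obtain ⟨rfl, rfl⟩ := Prod.mk.injEq .. ▸ h
    cases hw
    simpa using hv
  · exact hm a b w hw

lemma medB_correct (s t : List Char) :
    ∀ (N i j : Nat) (m : PySem.Dict (Nat × Nat) Int), i + j ≤ N → InvM s t m →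
      (medB s t i j m).1 = cell s t i j ∧ InvM s t (medB s t i j m).2 := by
  intro N
  induction N with
  | zero =>
    intro i j m h hm
    have hi : i = 0 := by omega
    have hj : j = 0 := by omega
    subst hi; subst hj
    rw [medB]
    cases hget : m.get? (0, 0) with
    | some v =>
      exact ⟨by simpa [cell_zero] using hm 0 0 v hget, hm⟩
    | none =>
      exact ⟨by simp [cell_zero], InvM_insert s t m 0 0 _ hm (by simp [cell_zero])⟩
  | succ N ih =>
    intro i j m h hm
    rw [medB]
    cases hget : m.get? (i, j) with
    | some v =>
      exact ⟨hm i j v hget, hm⟩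
    | none =>
      by_cases hi : i = 0
      · subst hi
        exact ⟨(cell_zero s t j).symm, InvM_insert s t m 0 j _ hm (cell_zero s t j).symm⟩
      · simp only [dif_neg hi]
        by_cases hj : j = 0
        · subst hj
          exact ⟨(cell_col_zero s t i).symm, InvM_insert s t m i 0 _ hm (cell_col_zero s t i).symm⟩
        · simp only [dif_neg hj]
          by_cases hc : (s.getD i ' ' == t.getD j ' ') = true
          · simp only [if_pos hc]
            obtain ⟨hval, hinv⟩ := ih (i-1) (j-1) m (by omega) hm
            refine ⟨?_, InvM_insert s t _ i j _ hinv ?_⟩ <;>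
              rw [hval, cell_pos s t i j (by omega) (by omega), if_pos hc]
          · simp only [if_neg hc]
            obtain ⟨ha, hma⟩ := ih (i-1) (j-1) m (by omega) hm
            obtain ⟨hb, hmb⟩ := ih i (j-1) _ (by omega) hma
            obtain ⟨hcv, hmc⟩ := ih (i-1) j _ (by omega) hmb
            refine ⟨?_, InvM_insert s t _ i j _ hmc ?_⟩ <;>
              rw [ha, hb, hcv, cell_pos s t i j (by omega) (by omega), if_neg hc]

-- the inner comprehension: appends the row values and preserves the invariant
lemma innerB_loop (s t : List Char) (i : Nat) :
    ∀ (js : List Nat) (rs : List Int) (m : PySem.Dict (Nat × Nat) Int), InvM s t m →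
      (js.foldl (fun (st : List Int × PySem.Dict (Nat × Nat) Int) j =>
          let p := medB s t i j st.2
          (st.1 ++ [p.1], p.2)) (rs, m)).1 = rs ++ js.map (fun j => cell s t i j) ∧
      InvM s t (js.foldl (fun (st : List Int × PySem.Dict (Nat × Nat) Int) j =>
          let p := medB s t i j st.2
          (st.1 ++ [p.1], p.2)) (rs, m)).2 := by
  intro js
  induction js with
  | nil => intro rs m hm; exact ⟨by simp, by simpa using hm⟩
  | cons j js ih =>
    intro rs m hm
    obtain ⟨hv, hinv⟩ := medB_correct s t (i + j) i j m (by omega) hm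
    simp only [List.foldl_cons, List.map_cons]
    obtain ⟨h1, h2⟩ := ih (rs ++ [(medB s t i j m).1]) _ hinv
    refine ⟨?_, h2⟩
    rw [h1, hv, List.append_assoc]
    rfl

-- the outer comprehension
lemma outerB_loop (s t : List Char) (n : Nat) :
    ∀ (is : List Nat) (rows : List (List Int)) (m : PySem.Dict (Nat × Nat) Int), InvM s t m →
      (is.foldl (fun (acc : List (List Int) × PySem.Dict (Nat × Nat) Int) i =>
          let r := (List.range n).foldl (fun (st : List Int × PySem.Dict (Nat × Nat) Int) j =>
              let p := medB s t i j st.2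
              (st.1 ++ [p.1], p.2)) ([], acc.2)
          (acc.1 ++ [r.1], r.2)) (rows, m)).1
      = rows ++ is.map (fun i => (List.range n).map (fun j => cell s t i j)) := by
  intro is
  induction is with
  | nil => intro rows m hm; simp
  | cons i is ih =>
    intro rows m hm
    obtain ⟨h1, h2⟩ := innerB_loop s t i (List.range n) [] m hm
    simp only [List.foldl_cons, List.map_cons]
    rw [ih _ _ h2, h1, List.nil_append, List.append_assoc]
    rfl

lemma fast_MED_arr_alt_eq_tbl (S T : String) :
    fast_MED_arr_alt S T =
      tbl (S.toList ++ List.replicate (max S.toList.length T.toList.length - S.toList.length) '0')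
          (T.toList ++ List.replicate (max S.toList.length T.toList.length - T.toList.length) '0')
          (max S.toList.length T.toList.length) := by
  unfold fast_MED_arr_alt tbl
  rw [outerB_loop _ _ _ (List.range _) [] PySem.Dict.empty (InvM_empty _ _)]
  simp

-- ===== VERDICT =====
theorem fast_MED_arr_spec : Claim_equal_fast_MED_arr := by
  intro S T _
  unfold Spec_fast_MED_arr
  rw [fast_MED_arr_eq_tbl, fast_MED_arr_alt_eq_tbl]
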